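-- pv_equiv track=rewrite | github.com/RayP995/cloudflare-gateway-pihole | src/utils.py | remove_subdomains
-- ===== SOURCE A (Python) =====
-- def remove_subdomains(domains: set[str]) -> set[str]:
--     top_level_domains = set()
--     subdomains = set()
--
--     for domain in domains:
--         parts = domain.split(".")
--
--         if len(parts) == 1:
--             top_level_domains.add(domain)
--         else:
--             subdomains.add(domain)
--
--     for subdomain in subdomains:
--         parts = subdomain.split(".")
--
--         is_subdomain = False
--         for i in range(1, len(parts)):
--             higher_domain = ".".join(parts[i:])
--             if higher_domain in subdomains:
--                 is_subdomain = True
--                 break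
--
--         if not is_subdomain:
--             top_level_domains.add(subdomain)
--
--     return top_level_domains
-- ===== SOURCE B (Python) =====
-- def remove_subdomains(domains: set[str]) -> set[str]:
--     # Keep every single-label domain; keep a multi-label domain unless some other
--     # multi-label domain in the input is a proper dot-boundary suffix of it.
--     kept = {d for d in domains if "." not in d}
--     multis = {d for d in domains if "." in d}
--     for d in multis:
--         if not any(d.endswith("." + anc) for anc in multis):
--             kept.add(d)
--     return kept
-- ===== Notes on version B (the rewrite author's own statement) =====
-- stated objective: simpler
-- what changed: A splits every domain into labels and, for each, enumerates its dot-suffixes by re-joining label tails and testing membership in a set; B never splits: it partitions domains by containing '.', then keeps a multi-label domain unless a direct pairwise d.endswith('.' + other) test fires against another multi-label domain.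
import Mathlib
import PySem

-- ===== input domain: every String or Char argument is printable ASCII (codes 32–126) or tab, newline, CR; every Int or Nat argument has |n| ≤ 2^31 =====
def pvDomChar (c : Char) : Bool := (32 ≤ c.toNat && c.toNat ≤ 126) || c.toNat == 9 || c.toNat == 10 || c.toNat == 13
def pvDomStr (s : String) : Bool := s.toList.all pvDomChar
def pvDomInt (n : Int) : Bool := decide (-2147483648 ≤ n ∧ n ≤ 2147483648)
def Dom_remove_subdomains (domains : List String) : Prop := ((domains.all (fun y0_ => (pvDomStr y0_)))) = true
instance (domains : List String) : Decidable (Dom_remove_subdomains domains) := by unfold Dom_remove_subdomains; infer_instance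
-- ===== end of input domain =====

-- B replaces A's split/join suffix enumeration with a direct pairwise endswith test (simpler, no label lists); same return value.


-- ===== PORT A =====
-- domain.split(".")  (sep is the non-empty literal ".", so PySem.Str.split? is always `some`; getD [] never fires)
def pvASplit (domain : String) : List String :=
  (PySem.Str.split? domain ".").getD []

def remove_subdomains (domains : List String) : List String :=
  let ts := domains.foldl
    (fun (ts : PySem.Set String × PySem.Set String) domain =>
      let parts := pvASplit domain
      if parts.length == 1 then (PySem.Set.add ts.1 domain, ts.2)
      else (ts.1, PySem.Set.add ts.2 domain))
    (PySem.Set.empty, PySem.Set.empty)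
  let top_level_domains := ts.1
  let subdomains := ts.2
  subdomains.foldl
    (fun top_level_domains subdomain =>
      let parts := pvASplit subdomain
      -- flag-with-break loop over range(1, len(parts)) = any
      let is_subdomain := (PySem.List.pyRange 1 (parts.length : Int) 1).any
        (fun i => PySem.Set.contains subdomains
          (PySem.Str.join "." (PySem.List.slice parts (some i) none)))
      if is_subdomain then top_level_domains
      else PySem.Set.add top_level_domains subdomain)
    top_level_domains

-- ===== PORT B =====
def remove_subdomains_alt (domains : List String) : List String :=
  let kept0 := domains.foldl
    (fun kept d => if PySem.Str.isIn "." d then kept else PySem.Set.add kept d)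
    PySem.Set.empty
  let multis := domains.foldl
    (fun ms d => if PySem.Str.isIn "." d then PySem.Set.add ms d else ms)
    PySem.Set.empty
  multis.foldl
    (fun kept d =>
      if multis.any (fun anc => PySem.Str.endswith d ("." ++ anc)) then kept
      else PySem.Set.add kept d)
    kept0

-- ===== PRECONDITION & SPEC =====
def Spec_remove_subdomains (domains : List String) (out : List String) : Prop := out = remove_subdomains_alt domains
instance (domains : List String) (out : List String) : Decidable (Spec_remove_subdomains domains out) := by unfold Spec_remove_subdomains; infer_instance

-- ===== CLAIM (what is proved, stated in full; the proofs are below) =====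
def Claim_equal_remove_subdomains : Prop := ∀ (domains : List String), Dom_remove_subdomains domains → Spec_remove_subdomains domains (remove_subdomains domains)

-- ===== LEMMAS AND PROOFS =====

-- reference recursion for Python's s.split(".") on char lists
def pvSplitDot : List Char → List (List Char)
  | [] => [[]]
  | c :: cs =>
    if c = '.' then [] :: pvSplitDot cs
    else
      match pvSplitDot cs with
      | [] => [[c]]          -- unreachable: pvSplitDot never returns []
      | p :: ps => (c :: p) :: ps

theorem pvSplitDot_ne_nil (cs : List Char) : pvSplitDot cs ≠ [] := by
  cases cs with
  | nil => simp [pvSplitDot]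
  | cons c cs =>
    simp only [pvSplitDot]
    split
    · simp
    · cases h : pvSplitDot cs <;> simp

-- the fuel-based go of splitOn, characterised against the reference recursion
theorem pvGo (l : List Char) : ∀ (fuel : Nat), l.length < fuel → ∀ (cur : List Char) (acc : List (List Char)),
    PySem.Chars.splitOn.go ['.'] fuel l cur acc
    = acc.reverse ++ (cur.reverse ++ (pvSplitDot l).headI) :: (pvSplitDot l).tail := by
  induction l with
  | nil =>
    intro fuel hf cur acc
    obtain ⟨f, rfl⟩ : ∃ f, fuel = f + 1 := ⟨fuel - 1, by omega⟩
    simp [PySem.Chars.splitOn.go, pvSplitDot]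
  | cons c rest ih =>
    intro fuel hf cur acc
    obtain ⟨f, rfl⟩ : ∃ f, fuel = f + 1 := ⟨fuel - 1, by omega⟩
    by_cases hc : c = '.'
    · subst hc
      have hgo : PySem.Chars.splitOn.go ['.'] (f+1) ('.' :: rest) cur acc
          = PySem.Chars.splitOn.go ['.'] f rest [] (cur.reverse :: acc) := by
        simp [PySem.Chars.splitOn.go, List.isPrefixOf]
      rw [hgo, ih f (by simpa using hf) [] (cur.reverse :: acc)]
      obtain ⟨p, ps, hps⟩ : ∃ p ps, pvSplitDot rest = p :: ps := by
        cases h : pvSplitDot rest with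
        | nil => exact absurd h (pvSplitDot_ne_nil rest)
        | cons p ps => exact ⟨p, ps, rfl⟩
      simp [pvSplitDot, hps]
    · have hgo : PySem.Chars.splitOn.go ['.'] (f+1) (c :: rest) cur acc
          = PySem.Chars.splitOn.go ['.'] f rest (c :: cur) acc := by
        simp [PySem.Chars.splitOn.go, List.isPrefixOf, Ne.symm hc]
      rw [hgo, ih f (by simpa using hf) (c :: cur) acc]
      obtain ⟨p, ps, hps⟩ : ∃ p ps, pvSplitDot rest = p :: ps := by
        cases h : pvSplitDot rest with
        | nil => exact absurd h (pvSplitDot_ne_nil rest)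
        | cons p ps => exact ⟨p, ps, rfl⟩
      simp [pvSplitDot, hc, hps]

theorem pvSplitOn_eq (cs : List Char) : PySem.Chars.splitOn cs ['.'] = pvSplitDot cs := by
  show PySem.Chars.splitOn.go ['.'] (cs.length + 1) cs [] [] = pvSplitDot cs
  rw [pvGo cs (cs.length + 1) (by omega) [] []]
  obtain ⟨p, ps, hps⟩ : ∃ p ps, pvSplitDot cs = p :: ps := by
    cases h : pvSplitDot cs with
    | nil => exact absurd h (pvSplitDot_ne_nil cs)
    | cons p ps => exact ⟨p, ps, rfl⟩
  simp [hps]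

theorem pvASplit_eq (d : String) : pvASplit d = (pvSplitDot d.toList).map String.ofList := by
  have hdot : (".":String).toList = ['.'] := rfl
  simp [pvASplit, PySem.Str.split?, PySem.Chars.split?, hdot, pvSplitOn_eq]

theorem pvJoin_splitDot (cs : List Char) : PySem.Chars.join ['.'] (pvSplitDot cs) = cs := by
  induction cs with
  | nil => simp [pvSplitDot, PySem.Chars.join_singleton]
  | cons c cs ih =>
    obtain ⟨p, ps, hps⟩ : ∃ p ps, pvSplitDot cs = p :: ps := by
      cases h : pvSplitDot cs with
      | nil => exact absurd h (pvSplitDot_ne_nil cs)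
      | cons p ps => exact ⟨p, ps, rfl⟩
    by_cases hc : c = '.'
    · subst hc
      rw [show pvSplitDot ('.' :: cs) = [] :: pvSplitDot cs by simp [pvSplitDot], hps,
        PySem.Chars.join_cons_cons, ← hps, ih]
      rfl
    · rw [show pvSplitDot (c :: cs) = (c :: p) :: ps by simp [pvSplitDot, hc, hps]]
      cases ps with
      | nil =>
        rw [PySem.Chars.join_singleton]
        rw [hps, PySem.Chars.join_singleton] at ih
        rw [ih]
      | cons q qs =>
        rw [PySem.Chars.join_cons_cons]
        rw [hps, PySem.Chars.join_cons_cons] at ih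
        rw [← ih]
        rfl

theorem pvLen_splitDot_one_iff (cs : List Char) :
    (pvSplitDot cs).length = 1 ↔ '.' ∉ cs := by
  induction cs with
  | nil => simp [pvSplitDot]
  | cons c cs ih =>
    obtain ⟨p, ps, hps⟩ : ∃ p ps, pvSplitDot cs = p :: ps := by
      cases h : pvSplitDot cs with
      | nil => exact absurd h (pvSplitDot_ne_nil cs)
      | cons p ps => exact ⟨p, ps, rfl⟩
    by_cases hc : c = '.'
    · subst hc
      rw [show pvSplitDot ('.' :: cs) = [] :: pvSplitDot cs by simp [pvSplitDot], hps]
      simp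
    · rw [show pvSplitDot (c :: cs) = (c :: p) :: ps by simp [pvSplitDot, hc, hps]]
      rw [hps] at ih
      simp only [List.length_cons] at ih ⊢
      rw [ih]
      simp [Ne.symm hc]

-- joining a proper tail of the parts yields a dot-boundary suffix
theorem pvJoin_drop (P : List (List Char)) (i : Nat) (h1 : 1 ≤ i) (h2 : i < P.length) :
    ∃ pre, PySem.Chars.join ['.'] P = pre ++ '.' :: PySem.Chars.join ['.'] (P.drop i) := by
  induction P generalizing i with
  | nil => simp at h2
  | cons p ps ih =>
    cases ps with
    | nil => simp at h2; omega
    | cons q qs =>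
      rcases Nat.lt_or_ge i 2 with hi | hi
      · have : i = 1 := by omega
        subst this
        exact ⟨p, by rw [PySem.Chars.join_cons_cons]; simp⟩
      · obtain ⟨pre, hpre⟩ := ih (i - 1) (by omega) (by simp at h2 ⊢; omega)
        refine ⟨p ++ '.' :: pre, ?_⟩
        rw [PySem.Chars.join_cons_cons,
          show (p :: q :: qs).drop i = (q :: qs).drop (i - 1) by
            rw [show i = (i-1) + 1 by omega]; rfl, hpre]
        simp

-- conversely, every dot-boundary suffix is the join of a proper tail of the parts
theorem pvDrop_of_dotSuffix (cs e : List Char) (pre : List Char) (h : cs = pre ++ '.' :: e) :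
    ∃ i : Nat, 1 ≤ i ∧ i < (pvSplitDot cs).length ∧
      PySem.Chars.join ['.'] ((pvSplitDot cs).drop i) = e := by
  induction cs generalizing pre with
  | nil => simp at h
  | cons c cs ih =>
    cases pre with
    | nil =>
      simp only [List.nil_append, List.cons.injEq] at h
      obtain ⟨rfl, rfl⟩ := h
      refine ⟨1, le_refl 1, ?_, ?_⟩
      · rw [show pvSplitDot ('.' :: cs) = [] :: pvSplitDot cs by simp [pvSplitDot]]
        have := pvSplitDot_ne_nil cs
        simp only [List.length_cons]
        cases h : pvSplitDot cs with
        | nil => exact absurd h this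
        | cons _ _ => simp
      · rw [show pvSplitDot ('.' :: cs) = [] :: pvSplitDot cs by simp [pvSplitDot]]
        simpa using pvJoin_splitDot cs
    | cons b pre' =>
      simp only [List.cons_append, List.cons.injEq] at h
      obtain ⟨rfl, hcs⟩ := h
      obtain ⟨i, hi1, hi2, hjoin⟩ := ih pre' hcs
      obtain ⟨p, ps, hps⟩ : ∃ p ps, pvSplitDot cs = p :: ps := by
        cases h : pvSplitDot cs with
        | nil => exact absurd h (pvSplitDot_ne_nil cs)
        | cons p ps => exact ⟨p, ps, rfl⟩
      by_cases hc : c = '.'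
      · subst hc
        refine ⟨i + 1, by omega, ?_, ?_⟩
        · rw [show pvSplitDot ('.' :: cs) = [] :: pvSplitDot cs by simp [pvSplitDot]]
          simpa using by omega
        · rw [show pvSplitDot ('.' :: cs) = [] :: pvSplitDot cs by simp [pvSplitDot]]
          simpa using hjoin
      · refine ⟨i, hi1, ?_, ?_⟩
        · rw [show pvSplitDot (c :: cs) = (c :: p) :: ps by simp [pvSplitDot, hc, hps]]
          rw [hps] at hi2
          simpa using hi2
        · rw [show pvSplitDot (c :: cs) = (c :: p) :: ps by simp [pvSplitDot, hc, hps]]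
          rw [hps] at hjoin
          obtain ⟨j, rfl⟩ : ∃ j, i = j + 1 := ⟨i - 1, by omega⟩
          simpa using hjoin

theorem pvStrJoin (Q : List (List Char)) :
    PySem.Str.join "." (Q.map String.ofList) = String.ofList (PySem.Chars.join ['.'] Q) := by
  have hdot : (".":String).toList = ['.'] := rfl
  simp [PySem.Str.join, hdot, List.map_map, Function.comp_def]

-- A's per-domain break-loop condition coincides with B's pairwise endswith condition
theorem pvCond_eq (S : List String) (d : String) :
    ((PySem.List.pyRange 1 ((pvASplit d).length : Int) 1).any
      (fun i => PySem.Set.contains S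
        (PySem.Str.join "." (PySem.List.slice (pvASplit d) (some i) none))))
    = S.any (fun anc => PySem.Str.endswith d ("." ++ anc)) := by
  rw [Bool.eq_iff_iff, List.any_eq_true, List.any_eq_true]
  constructor
  · rintro ⟨i, hi, helem⟩
    rw [PySem.List.mem_pyRange_one] at hi
    obtain ⟨hi1, hi2⟩ := hi
    rw [PySem.List.slice_from _ (by omega), pvASplit_eq, ← List.map_drop, pvStrJoin,
      PySem.Set.contains, List.contains_iff_mem] at helem
    rw [pvASplit_eq, List.length_map] at hi2
    refine ⟨_, helem, ?_⟩
    rw [PySem.Str.endswith_eq, String.toList_append, String.toList_ofList]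
    rw [PySem.Chars.endswith_iff]
    obtain ⟨pre, hpre⟩ := pvJoin_drop (pvSplitDot d.toList) i.toNat (by omega) (by omega)
    rw [pvJoin_splitDot] at hpre
    exact ⟨pre, by simp only [String.toList_ofList]; exact hpre.symm⟩
  · rintro ⟨anc, hanc, hend⟩
    rw [PySem.Str.endswith_eq, String.toList_append, PySem.Chars.endswith_iff] at hend
    obtain ⟨t, ht⟩ := hend
    have ht' : d.toList = t ++ '.' :: anc.toList := by
      rw [← ht]; rfl
    obtain ⟨i, hi1, hi2, hjoin⟩ := pvDrop_of_dotSuffix d.toList anc.toList t ht'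
    refine ⟨(i : Int), ?_, ?_⟩
    · rw [PySem.List.mem_pyRange_one]
      constructor
      · exact_mod_cast hi1
      · rw [pvASplit_eq, List.length_map]; exact_mod_cast hi2
    · rw [PySem.List.slice_from _ (by omega), pvASplit_eq, ← List.map_drop, pvStrJoin,
        PySem.Set.contains, List.contains_iff_mem]
      rw [show ((i : Int)).toNat = i from rfl, hjoin, String.ofList_toList]
      exact hanc

-- A's "len(parts) == 1" test coincides with B's '"." not in d' test
theorem pvSingle_iff (d : String) : ((pvASplit d).length == 1) = !(PySem.Str.isIn "." d) := by
  rw [Bool.eq_iff_iff]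
  simp only [beq_iff_eq, Bool.not_eq_true']
  rw [pvASplit_eq, List.length_map, pvLen_splitDot_one_iff,
    show PySem.Str.isIn "." d = PySem.Chars.isIn ['.'] d.toList from rfl,
    PySem.Chars.isIn_eq_false_iff, List.singleton_infix_iff]

-- A's one split-pass equals B's two membership passes
theorem pvPhase1 (l : List String) (t s : PySem.Set String) :
    l.foldl
      (fun (ts : PySem.Set String × PySem.Set String) domain =>
        let parts := pvASplit domain
        if parts.length == 1 then (PySem.Set.add ts.1 domain, ts.2)
        else (ts.1, PySem.Set.add ts.2 domain)) (t, s)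
    = (l.foldl (fun kept d => if PySem.Str.isIn "." d then kept else PySem.Set.add kept d) t,
       l.foldl (fun ms d => if PySem.Str.isIn "." d then PySem.Set.add ms d else ms) s) := by
  induction l generalizing t s with
  | nil => rfl
  | cons d l ih =>
    have hb := pvSingle_iff d
    cases h : PySem.Str.isIn "." d
    · rw [h] at hb
      simp only [Bool.not_false] at hb
      simp only [List.foldl_cons]
      rw [if_pos hb, if_neg (by rw [h]; exact Bool.false_ne_true),
        if_neg (by rw [h]; exact Bool.false_ne_true)]
      exact ih _ _
    · rw [h] at hb
      simp only [Bool.not_true] at hb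
      simp only [List.foldl_cons]
      rw [if_neg (by rw [hb]; exact Bool.false_ne_true), if_pos h, if_pos h]
      exact ih _ _

-- ===== VERDICT (by name: the statement is the Claim_ definition above) =====
theorem remove_subdomains_spec : Claim_equal_remove_subdomains := by
  intro domains _
  unfold Spec_remove_subdomains remove_subdomains remove_subdomains_alt
  simp only [pvPhase1]
  congr 1
  funext acc d
  simp only [pvCond_eq]
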